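-- pv_equiv track=rewrite | github.com/soyeonvv/Algorithm | programmers/Lv3/152995.py | solution
-- ===== SOURCE A (Python) =====
-- def solution(scores):
--     answer = 1
--     wanho = scores[0]
--
--     scores.sort(key=lambda x:(-x[0], x[1]))
--
--     temp = 0
--     for score in scores:
--         if wanho[0] < score[0] and wanho[1] < score[1]:
--             answer = -1
--             break
--
--         if temp <= score[1]:
--             if sum(wanho) < sum(score):
--                 answer += 1
--             temp = score[1]
--
--     return answer
-- ===== SOURCE B (Python) =====
-- def solution(scores):
--     wanho = scores[0]
--     scores.sort(key=lambda x: (-x[0], x[1]))  # same in-place sort as A (callers observe it)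
--     # wanho is disqualified iff some candidate beats it in both scores.
--     rivals = [d[1] for d in scores if d[0] > wanho[0]]
--     if rivals and wanho[1] < max(rivals):
--         return -1
--     # Order-independent qualification test: a candidate qualifies iff its second
--     # score reaches the best second score among candidates with a strictly
--     # higher first score (with A's baseline of 0).
--     rank = 1
--     for c in scores:
--         if sum(c) > sum(wanho) and c[1] >= max([0] + [d[1] for d in scores if d[0] > c[0]]):
--             rank += 1
--     return rank
-- ===== Notes on version B (the rewrite author's own statement) =====
-- stated objective: alternative
-- what changed: A ranks via a single fused scan over the sorted list that carries a running maximum and breaks early; B drops the order dependence entirely: it tests disqualification as 'wanho's second score is below the max second score among candidates with a higher first score', and ranks by an independent per-candidate threshold test (c qualifies iff c[1] reaches the best second score, floored at 0, among candidates with a strictly higher first score).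
import Mathlib
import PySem

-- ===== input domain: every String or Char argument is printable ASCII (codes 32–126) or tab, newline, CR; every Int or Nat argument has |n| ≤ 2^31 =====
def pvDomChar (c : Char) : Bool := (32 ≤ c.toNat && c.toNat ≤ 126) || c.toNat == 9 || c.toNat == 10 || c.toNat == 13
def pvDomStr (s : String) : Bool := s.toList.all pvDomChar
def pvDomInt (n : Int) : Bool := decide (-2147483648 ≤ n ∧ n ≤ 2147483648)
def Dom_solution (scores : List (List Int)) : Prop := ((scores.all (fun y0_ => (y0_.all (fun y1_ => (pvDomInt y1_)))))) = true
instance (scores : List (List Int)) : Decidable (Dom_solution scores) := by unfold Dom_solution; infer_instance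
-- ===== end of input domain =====

-- B replaces A's sorted single-pass running-maximum scan by an order-independent
-- per-candidate threshold test (objective: alternative algorithm, same result).
-- Both Pythons perform the same in-place sort of `scores`; the equivalence proved
-- here is about the return value.

-- ===== PORT A =====
-- A's fused loop: state (answer, temp); breaks with -1 on a strict dominator of wanho.
def aLoop (wanho : List Int) : List (List Int) → Int → Int → Int
  | [], answer, _ => answer
  | score :: rest, answer, temp =>
    if PySem.List.pyGetD wanho 0 0 < PySem.List.pyGetD score 0 0 ∧
       PySem.List.pyGetD wanho 1 0 < PySem.List.pyGetD score 1 0 then -1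
    else if temp ≤ PySem.List.pyGetD score 1 0 then
      aLoop wanho rest (if wanho.sum < score.sum then answer + 1 else answer)
        (PySem.List.pyGetD score 1 0)
    else
      aLoop wanho rest answer temp

def solution (scores : List (List Int)) : Int :=
  match scores with
  | [] => 0  -- Python raises IndexError here (outside Pre_solution)
  | wanho :: _ =>
    aLoop wanho
      (PySem.List.sorted2 scores (fun x => -(PySem.List.pyGetD x 0 0)) (fun x => PySem.List.pyGetD x 1 0))
      1 0

-- ===== PORT B =====
-- Source B's counting loop: rank += 1 when sum(c) > sum(wanho) and
-- c[1] >= max([0] + [d[1] for d in scores if d[0] > c[0]]).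
def bRank (wanho : List Int) (ss : List (List Int)) : List (List Int) → Int → Int
  | [], rank => rank
  | c :: rest, rank =>
    bRank wanho ss rest
      (if c.sum > wanho.sum ∧
          (PySem.List.max? ((0 : Int) ::
              (ss.filter (fun d => decide (PySem.List.pyGetD c 0 0 < PySem.List.pyGetD d 0 0))).map
                (fun d => PySem.List.pyGetD d 1 0)) (fun y => y)).getD 0 ≤ PySem.List.pyGetD c 1 0
       then rank + 1 else rank)

def solution_alt (scores : List (List Int)) : Int :=
  match scores with
  | [] => 0  -- Python raises IndexError here (outside Pre_solution)
  | wanho :: _ =>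
    let ss := PySem.List.sorted2 scores (fun x => -(PySem.List.pyGetD x 0 0)) (fun x => PySem.List.pyGetD x 1 0)
    let rivals := (ss.filter (fun d => decide (PySem.List.pyGetD wanho 0 0 < PySem.List.pyGetD d 0 0))).map
      (fun d => PySem.List.pyGetD d 1 0)
    if rivals ≠ [] ∧ PySem.List.pyGetD wanho 1 0 < (PySem.List.max? rivals (fun y => y)).getD 0 then -1
    else bRank wanho ss ss 1

-- ===== PRECONDITION & SPEC =====
-- A raises IndexError when scores is empty (scores[0]) or any row has fewer than
-- two entries (the sort key reads x[0] and x[1]); exactly those inputs are excluded.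
def Pre_solution (scores : List (List Int)) : Prop :=
  scores ≠ [] ∧ ∀ s ∈ scores, 2 ≤ s.length
instance (scores : List (List Int)) : Decidable (Pre_solution scores) := by
  unfold Pre_solution; infer_instance

def pvWitness_solution : List (List Int) := [[3, 5], [5, 2], [2, 8]]

def Spec_solution (scores : List (List Int)) (out : Int) : Prop := out = solution_alt scores
instance (scores : List (List Int)) (out : Int) : Decidable (Spec_solution scores out) := by
  unfold Spec_solution; infer_instance

-- ===== CLAIM (what is proved, stated in full; the proofs are below) =====
def Claim_equal_solution : Prop :=
  ∀ (scores : List (List Int)), Dom_solution scores → Pre_solution scores →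
    Spec_solution scores (solution scores)

-- ===== LEMMAS AND PROOFS =====

-- sorted-before relation of the key (-x[0], x[1])
def pvR (a b : List Int) : Prop :=
  PySem.List.pyGetD b 0 0 < PySem.List.pyGetD a 0 0 ∨
  (PySem.List.pyGetD a 0 0 = PySem.List.pyGetD b 0 0 ∧
   PySem.List.pyGetD a 1 0 ≤ PySem.List.pyGetD b 1 0)

-- the comparator sorted2 uses for this key
def pvLt (a b : List Int) : Bool :=
  decide (-(PySem.List.pyGetD a 0 0) < -(PySem.List.pyGetD b 0 0)) ||
  (!decide (-(PySem.List.pyGetD b 0 0) < -(PySem.List.pyGetD a 0 0)) &&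
   decide (PySem.List.pyGetD a 1 0 < PySem.List.pyGetD b 1 0))

theorem pvLt_true_iff (a b : List Int) :
    pvLt a b = true ↔ (PySem.List.pyGetD b 0 0 < PySem.List.pyGetD a 0 0 ∨
      (PySem.List.pyGetD a 0 0 = PySem.List.pyGetD b 0 0 ∧
       PySem.List.pyGetD a 1 0 < PySem.List.pyGetD b 1 0)) := by
  simp [pvLt]; omega

theorem pvLt_false_iff (a b : List Int) : ¬ pvLt a b = true ↔ pvR b a := by
  rw [pvLt_true_iff]; unfold pvR; omega

theorem insertBy_pairwise (x : List Int) (l : List (List Int)) (h : l.Pairwise pvR) :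
    (PySem.List.insertBy pvLt x l).Pairwise pvR := by
  induction l with
  | nil => simp [PySem.List.insertBy]
  | cons y ys ih =>
    rw [List.pairwise_cons] at h
    obtain ⟨hy, hys⟩ := h
    show (if pvLt x y then x :: y :: ys else y :: PySem.List.insertBy pvLt x ys).Pairwise pvR
    by_cases hxy : pvLt x y = true
    · rw [if_pos hxy]
      have hRxy : pvR x y := by
        rw [pvLt_true_iff] at hxy; unfold pvR; omega
      refine List.pairwise_cons.2 ⟨?_, List.pairwise_cons.2 ⟨hy, hys⟩⟩
      intro z hz
      rcases List.mem_cons.1 hz with rfl | hz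
      · exact hRxy
      · have := hy z hz
        unfold pvR at *; omega
    · rw [if_neg hxy]
      refine List.pairwise_cons.2 ⟨?_, ih hys⟩
      intro z hz
      rcases (PySem.List.mem_insertBy pvLt x z ys).1 hz with hzx | hz2
      · rw [hzx]; exact (pvLt_false_iff x y).1 hxy
      · exact hy z hz2

theorem foldl_insertBy_pairwise (xs : List (List Int)) (acc : List (List Int))
    (h : acc.Pairwise pvR) :
    (xs.foldl (fun acc x => PySem.List.insertBy pvLt x acc) acc).Pairwise pvR := by
  induction xs generalizing acc with
  | nil => exact h
  | cons x xs ih => exact ih _ (insertBy_pairwise x acc h)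

theorem sorted2_pairwise_R (xs : List (List Int)) :
    (PySem.List.sorted2 xs (fun x => -(PySem.List.pyGetD x 0 0))
      (fun x => PySem.List.pyGetD x 1 0)).Pairwise pvR := by
  have : PySem.List.sorted2 xs (fun x => -(PySem.List.pyGetD x 0 0))
      (fun x => PySem.List.pyGetD x 1 0)
      = xs.foldl (fun acc x => PySem.List.insertBy pvLt x acc) [] := rfl
  rw [this]
  exact foldl_insertBy_pairwise xs [] (List.Pairwise.nil)

-- A's loop split into domination test, frontier, count (proof-layer decomposition)
def pDominated (wanho : List Int) (l : List (List Int)) : Bool :=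
  l.any (fun c => decide (PySem.List.pyGetD wanho 0 0 < PySem.List.pyGetD c 0 0 ∧
                          PySem.List.pyGetD wanho 1 0 < PySem.List.pyGetD c 1 0))

def pFrontier : List (List Int) → Int → List (List Int)
  | [], _ => []
  | c :: rest, temp =>
    if temp ≤ PySem.List.pyGetD c 1 0 then c :: pFrontier rest (PySem.List.pyGetD c 1 0)
    else pFrontier rest temp

def pCount (wanho : List Int) : List (List Int) → Int
  | [] => 0
  | c :: rest => (if c.sum > wanho.sum then 1 else 0) + pCount wanho rest

-- A's fused loop equals the split, for ANY list and loop state.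
theorem aLoop_eq (wanho : List Int) (l : List (List Int)) (answer temp : Int) :
    aLoop wanho l answer temp =
      if pDominated wanho l then -1 else answer + pCount wanho (pFrontier l temp) := by
  induction l generalizing answer temp with
  | nil => simp [aLoop, pDominated, pFrontier, pCount]
  | cons c rest ih =>
    have hcons : pDominated wanho (c :: rest)
        = (decide (PySem.List.pyGetD wanho 0 0 < PySem.List.pyGetD c 0 0 ∧
             PySem.List.pyGetD wanho 1 0 < PySem.List.pyGetD c 1 0) || pDominated wanho rest) := rfl
    simp only [aLoop, pFrontier, hcons]
    by_cases hdom : PySem.List.pyGetD wanho 0 0 < PySem.List.pyGetD c 0 0 ∧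
        PySem.List.pyGetD wanho 1 0 < PySem.List.pyGetD c 1 0
    · simp [hdom]
    · rw [if_neg hdom, decide_eq_false hdom, Bool.false_or]
      by_cases htemp : temp ≤ PySem.List.pyGetD c 1 0
      · rw [if_pos htemp, if_pos htemp, ih]
        rcases Bool.eq_false_or_eq_true (pDominated wanho rest) with hb | hb <;> rw [hb]
        · simp
        · simp only [Bool.false_eq_true, if_false, pCount, gt_iff_lt]
          by_cases hsum : wanho.sum < c.sum <;> simp only [hsum, if_true, if_false] <;> omega
      · rw [if_neg htemp, if_neg htemp, ih]

-- running max over Int: order characterisations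
theorem foldl_max_le_iff (xs : List Int) (a w : Int) :
    xs.foldl max a ≤ w ↔ (a ≤ w ∧ ∀ y ∈ xs, y ≤ w) := by
  constructor
  · intro h
    obtain ⟨h1, h2⟩ := PySem.List.le_foldl_max xs a
    exact ⟨le_trans h1 h, fun y hy => le_trans (h2 y hy) h⟩
  · intro ⟨h1, h2⟩
    rcases PySem.List.foldl_max_mem xs a with h | h
    · rw [h]; exact h1
    · exact h2 _ h

theorem lt_foldl_max_iff (xs : List Int) (a w : Int) :
    w < xs.foldl max a ↔ (w < a ∨ ∃ y ∈ xs, w < y) := by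
  rw [← not_le, ← not_iff_not]
  push Not
  rw [foldl_max_le_iff]

-- the membership description of [d[1] for d in l if d[0] > c0]
theorem mem_seconds_iff (l : List (List Int)) (c0 y : Int) :
    y ∈ (l.filter (fun d => decide (c0 < PySem.List.pyGetD d 0 0))).map
          (fun d => PySem.List.pyGetD d 1 0)
      ↔ ∃ d ∈ l, c0 < PySem.List.pyGetD d 0 0 ∧ PySem.List.pyGetD d 1 0 = y := by
  simp [List.mem_map, List.mem_filter, and_assoc]

-- max of a possibly-empty Int list, as B guards it
theorem exists_lt_iff_max (xs : List Int) (w : Int) :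
    (∃ y ∈ xs, w < y) ↔ (xs ≠ [] ∧ w < (PySem.List.max? xs (fun y => y)).getD 0) := by
  cases xs with
  | nil => simp
  | cons r t =>
    rw [PySem.List.max?_id_cons, Option.getD_some, lt_foldl_max_iff]
    simp only [ne_eq, List.cons_ne_nil, not_false_iff, true_and, List.mem_cons]
    constructor
    · rintro ⟨y, (rfl | hy), hw⟩
      · exact Or.inl hw
      · exact Or.inr ⟨y, hy, hw⟩
    · rintro (hw | ⟨y, hy, hw⟩)
      · exact ⟨r, Or.inl rfl, hw⟩
      · exact ⟨y, Or.inr hy, hw⟩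

-- (a) disqualification: A's any-test equals B's max-of-rivals test
theorem dominated_iff_rivals (wanho : List Int) (ss : List (List Int)) :
    pDominated wanho ss = true ↔
      (((ss.filter (fun d => decide (PySem.List.pyGetD wanho 0 0 < PySem.List.pyGetD d 0 0))).map
          (fun d => PySem.List.pyGetD d 1 0)) ≠ [] ∧
        PySem.List.pyGetD wanho 1 0 <
          (PySem.List.max?
            ((ss.filter (fun d => decide (PySem.List.pyGetD wanho 0 0 < PySem.List.pyGetD d 0 0))).map
              (fun d => PySem.List.pyGetD d 1 0)) (fun y => y)).getD 0) := by
  rw [← exists_lt_iff_max]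
  rw [pDominated, List.any_eq_true]
  constructor
  · rintro ⟨d, hd, hdec⟩
    rw [decide_eq_true_eq] at hdec
    exact ⟨PySem.List.pyGetD d 1 0,
      (mem_seconds_iff ss _ _).2 ⟨d, hd, hdec.1, rfl⟩, hdec.2⟩
  · rintro ⟨y, hy, hw⟩
    obtain ⟨d, hd, hdd, rfl⟩ := (mem_seconds_iff ss _ y).1 hy
    exact ⟨d, hd, by rw [decide_eq_true_eq]; exact ⟨hdd, hw⟩⟩

-- the Boolean qualification predicate: above temp and undominated in l
def pvQ (l : List (List Int)) (temp : Int) (c : List Int) : Bool :=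
  decide (temp ≤ PySem.List.pyGetD c 1 0) &&
    !(l.any (fun d => decide (PySem.List.pyGetD c 0 0 < PySem.List.pyGetD d 0 0 ∧
                              PySem.List.pyGetD c 1 0 < PySem.List.pyGetD d 1 0)))

theorem bool_eq_of_iff {a b : Bool} (h : a = true ↔ b = true) : a = b := by
  cases a <;> cases b <;> simp_all

theorem pvQ_true_iff (l : List (List Int)) (temp : Int) (c : List Int) :
    pvQ l temp c = true ↔
      (temp ≤ PySem.List.pyGetD c 1 0 ∧ ∀ d ∈ l,
        ¬ (PySem.List.pyGetD c 0 0 < PySem.List.pyGetD d 0 0 ∧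
           PySem.List.pyGetD c 1 0 < PySem.List.pyGetD d 1 0)) := by
  simp [pvQ]

-- (b) frontier of a sorted list = filter by "undominated and above temp"
theorem pFrontier_eq_filter (l : List (List Int)) (temp : Int) (h : l.Pairwise pvR) :
    pFrontier l temp = l.filter (pvQ l temp) := by
  induction l generalizing temp with
  | nil => rfl
  | cons c rest ih =>
    rw [List.pairwise_cons] at h
    obtain ⟨hc, hrest⟩ := h
    have hQc : ∀ t, pvQ (c :: rest) t c = decide (t ≤ PySem.List.pyGetD c 1 0) := by
      intro t
      apply bool_eq_of_iff
      rw [pvQ_true_iff, decide_eq_true_eq]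
      constructor
      · exact fun h => h.1
      · intro ht
        refine ⟨ht, ?_⟩
        intro d hd
        rcases List.mem_cons.1 hd with rfl | hd
        · omega
        · have := hc d hd; unfold pvR at this; omega
    by_cases htemp : temp ≤ PySem.List.pyGetD c 1 0
    · rw [pFrontier, if_pos htemp,
        List.filter_cons_of_pos (by rw [hQc]; exact decide_eq_true htemp), ih _ hrest]
      congr 1
      apply List.filter_congr
      intro d hd
      apply bool_eq_of_iff
      rw [pvQ_true_iff, pvQ_true_iff]
      have hRcd := hc d hd; unfold pvR at hRcd
      constructor
      · intro ⟨h1, h2⟩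
        refine ⟨by omega, ?_⟩
        intro e he
        rcases List.mem_cons.1 he with rfl | he
        · omega
        · exact h2 e he
      · intro ⟨h1, h2⟩
        have hcc := h2 c (List.mem_cons_self ..)
        refine ⟨by omega, fun e he => h2 e (List.mem_cons_of_mem _ he)⟩
    · rw [pFrontier, if_neg htemp,
        List.filter_cons_of_neg (by rw [hQc]; simpa using htemp), ih _ hrest]
      apply List.filter_congr
      intro d hd
      apply bool_eq_of_iff
      rw [pvQ_true_iff, pvQ_true_iff]
      constructor
      · intro ⟨h1, h2⟩
        refine ⟨h1, ?_⟩
        intro e he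
        rcases List.mem_cons.1 he with rfl | he
        · omega
        · exact h2 e he
      · intro ⟨h1, h2⟩
        exact ⟨h1, fun e he => h2 e (List.mem_cons_of_mem _ he)⟩

-- counts as countP
theorem pCount_eq_countP (wanho : List Int) (l : List (List Int)) :
    pCount wanho l = (l.countP (fun c => decide (wanho.sum < c.sum)) : Int) := by
  induction l with
  | nil => rfl
  | cons c rest ih =>
    rw [pCount, ih, List.countP_cons]
    by_cases h : wanho.sum < c.sum
    · simp [h]; omega
    · simp [h, gt_iff_lt]

theorem bRank_eq_countP (wanho : List Int) (ss : List (List Int)) (l : List (List Int)) (r : Int) :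
    bRank wanho ss l r = r + (l.countP (fun c =>
      decide (c.sum > wanho.sum) &&
      decide ((PySem.List.max? ((0 : Int) ::
          (ss.filter (fun d => decide (PySem.List.pyGetD c 0 0 < PySem.List.pyGetD d 0 0))).map
            (fun d => PySem.List.pyGetD d 1 0)) (fun y => y)).getD 0 ≤ PySem.List.pyGetD c 1 0)) : Int) := by
  induction l generalizing r with
  | nil => simp [bRank]
  | cons c rest ih =>
    rw [bRank, ih, List.countP_cons]
    by_cases h1 : c.sum > wanho.sum <;>
      by_cases h2 : (PySem.List.max? ((0 : Int) ::
          (ss.filter (fun d => decide (PySem.List.pyGetD c 0 0 < PySem.List.pyGetD d 0 0))).map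
            (fun d => PySem.List.pyGetD d 1 0)) (fun y => y)).getD 0 ≤ PySem.List.pyGetD c 1 0 <;>
      simp [h1, h2] <;> omega

-- B's threshold test equals the frontier-membership test, pointwise
theorem threshold_eq_Q (ss : List (List Int)) (c : List Int) :
    decide ((PySem.List.max? ((0 : Int) ::
        (ss.filter (fun d => decide (PySem.List.pyGetD c 0 0 < PySem.List.pyGetD d 0 0))).map
          (fun d => PySem.List.pyGetD d 1 0)) (fun y => y)).getD 0 ≤ PySem.List.pyGetD c 1 0)
      = pvQ ss 0 c := by
  apply bool_eq_of_iff
  rw [decide_eq_true_eq, pvQ_true_iff, PySem.List.max?_id_cons, Option.getD_some,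
    foldl_max_le_iff]
  constructor
  · intro ⟨h0, hall⟩
    refine ⟨h0, ?_⟩
    intro d hd hdom
    have : PySem.List.pyGetD d 1 0 ≤ PySem.List.pyGetD c 1 0 :=
      hall _ ((mem_seconds_iff ss _ _).2 ⟨d, hd, hdom.1, rfl⟩)
    omega
  · intro ⟨h0, hall⟩
    refine ⟨h0, ?_⟩
    intro y hy
    obtain ⟨d, hd, hdd, rfl⟩ := (mem_seconds_iff ss _ y).1 hy
    have := hall d hd
    omega

-- the two else-branches agree on the sorted list
theorem rank_eq_count (wanho : List Int) (ss : List (List Int)) (hp : ss.Pairwise pvR) :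
    bRank wanho ss ss 1 = 1 + pCount wanho (pFrontier ss 0) := by
  rw [bRank_eq_countP, pFrontier_eq_filter ss 0 hp, pCount_eq_countP]
  congr 2
  rw [List.countP_filter]
  apply List.countP_congr
  intro c _
  rw [← threshold_eq_Q ss c]

-- ===== VERDICT (by name: the statement is the Claim_ definition above) =====
theorem solution_spec : Claim_equal_solution := by
  intro scores _ _
  unfold Spec_solution
  match scores with
  | [] => rfl
  | wanho :: rest =>
    show aLoop wanho
        (PySem.List.sorted2 (wanho :: rest) (fun x => -(PySem.List.pyGetD x 0 0))
          (fun x => PySem.List.pyGetD x 1 0)) 1 0 = _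
    set ss := PySem.List.sorted2 (wanho :: rest) (fun x => -(PySem.List.pyGetD x 0 0))
      (fun x => PySem.List.pyGetD x 1 0) with hss
    have hp : ss.Pairwise pvR := by rw [hss]; exact sorted2_pairwise_R _
    rw [aLoop_eq]
    show _ = solution_alt (wanho :: rest)
    rw [solution_alt]
    by_cases hdom : pDominated wanho ss = true
    · rw [if_pos hdom]
      rw [if_pos ((dominated_iff_rivals wanho ss).1 hdom)]
    · rw [if_neg (fun hc => hdom ((dominated_iff_rivals wanho ss).2 hc))]
      rw [if_neg (by simpa using hdom)]
      exact (rank_eq_count wanho ss hp).symm
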